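-- pv_equiv track=rewrite | github.com/sandeep-sala/Code | code-wars/py/Reverse_sublists_of_even_numbers.py | rev_sub
-- ===== SOURCE A (Python) =====
-- def rev_sub(arr):
--     l,k = [],[]
--     for i in range(len(arr)):
--         if arr[i]%2==0:
--             k.insert(0,arr[i])
--         else:
--             if k:
--                 l+=k
--                 k = []
--             l.append(arr[i])
--     return l+k
-- ===== SOURCE B (Python) =====
-- def rev_sub(arr):
--     out = []
--     i, n = 0, len(arr)
--     while i < n:
--         head_even = arr[i] % 2 == 0
--         j = i
--         while j < n and (arr[j] % 2 == 0) == head_even: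
--             j += 1
--         seg = arr[i:j]
--         out += seg[::-1] if head_even else seg
--         i = j
--     return out
-- ===== Notes on version B (the rewrite author's own statement) =====
-- stated objective: alternative
-- what changed: Replaces A's single pass with a running reversed buffer and flush-on-odd flag by a two-stage run decomposition: split the list into maximal same-parity runs and emit each run reversed if even, unchanged if odd.
import Mathlib
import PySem

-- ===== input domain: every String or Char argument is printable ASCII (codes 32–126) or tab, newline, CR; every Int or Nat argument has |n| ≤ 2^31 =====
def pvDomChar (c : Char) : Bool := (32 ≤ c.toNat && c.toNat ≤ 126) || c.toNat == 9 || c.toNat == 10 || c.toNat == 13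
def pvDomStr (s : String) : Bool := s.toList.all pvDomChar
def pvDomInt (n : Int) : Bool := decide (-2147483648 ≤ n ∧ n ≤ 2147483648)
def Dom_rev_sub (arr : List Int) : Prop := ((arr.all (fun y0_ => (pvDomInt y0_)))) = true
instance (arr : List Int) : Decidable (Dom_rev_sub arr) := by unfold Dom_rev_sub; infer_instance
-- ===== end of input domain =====

-- B replaces A's running-reversed-buffer/flush pass by a maximal-same-parity-run decomposition
-- (objective: alternative; same O(n) cost).
-- Note: % on Int with the positive literal divisor 2 coincides with Python's %.

-- ===== PORT A =====
-- one loop step of A: even -> k.insert(0,x); odd -> flush k into l (if nonempty), append x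
def stepA (s : List Int × List Int) (x : Int) : List Int × List Int :=
  if x % 2 == 0 then (s.1, x :: s.2)
  else if s.2.isEmpty then (s.1 ++ [x], s.2) else (s.1 ++ s.2 ++ [x], [])

def rev_sub (arr : List Int) : List Int :=
  let s := arr.foldl stepA ([], [])
  s.1 ++ s.2

-- ===== PORT B =====
-- B: peel off the maximal run sharing the head's parity (seg = arr[i:j]),
-- reverse it if even, emit it unchanged if odd, recurse on the rest.
def rev_sub_alt (arr : List Int) : List Int :=
  match arr with
  | [] => []
  | x :: tl =>
    let p : Int → Bool := fun y => (y % 2 == 0) == (x % 2 == 0)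
    let seg := x :: tl.takeWhile p
    let rest := tl.dropWhile p
    (if x % 2 == 0 then seg.reverse else seg) ++ rev_sub_alt rest
termination_by arr.length
decreasing_by
  exact Nat.lt_succ_of_le (List.length_dropWhile_le _ _)

-- ===== PRECONDITION & SPEC =====
def Spec_rev_sub (arr : List Int) (out : List Int) : Prop := out = rev_sub_alt arr
instance (arr : List Int) (out : List Int) : Decidable (Spec_rev_sub arr out) := by unfold Spec_rev_sub; infer_instance

-- ===== CLAIM (what is proved, stated in full; the proofs are below) =====
def Claim_equal_rev_sub : Prop := ∀ (arr : List Int), Dom_rev_sub arr → Spec_rev_sub arr (rev_sub arr)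

-- ===== LEMMAS AND PROOFS =====

-- A's loop as a function of the starting state
def runA (l k xs : List Int) : List Int :=
  let s := xs.foldl stepA (l, k)
  s.1 ++ s.2

theorem stepA_odd (l k : List Int) (x : Int) (h : (x % 2 == 0) = false) :
    stepA (l, k) x = (l ++ k ++ [x], []) := by
  cases k with
  | nil => simp [stepA, h]
  | cons a t => simp [stepA, h]

theorem runA_prefix (xs : List Int) : ∀ l k : List Int, runA l k xs = l ++ runA [] k xs := by
  induction xs with
  | nil => intro l k; simp [runA]
  | cons x t ih =>
    intro l k
    by_cases h : (x % 2 == 0) = true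
    · have h1 : runA l k (x :: t) = runA l (x :: k) t := by
        simp [runA, List.foldl_cons, stepA, h]
      have h2 : runA [] k (x :: t) = runA [] (x :: k) t := by
        simp [runA, List.foldl_cons, stepA, h]
      rw [h1, h2, ih]
    · have h' : (x % 2 == 0) = false := by simpa using h
      have h1 : runA l k (x :: t) = runA (l ++ k ++ [x]) [] t := by
        simp [runA, List.foldl_cons, stepA_odd _ _ _ h']
      have h2 : runA [] k (x :: t) = runA (k ++ [x]) [] t := by
        simp [runA, List.foldl_cons, stepA_odd _ _ _ h']
      rw [h1, h2, ih, ih (k ++ [x]) []]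
      simp [List.append_assoc]

theorem alt_nil : rev_sub_alt [] = [] := by rw [rev_sub_alt]

-- rev_sub_alt splits off the maximal even prefix
theorem alt_even_split (t : List Int) :
    rev_sub_alt t =
      (t.takeWhile (fun y => y % 2 == 0)).reverse ++
        rev_sub_alt (t.dropWhile (fun y => y % 2 == 0)) := by
  cases t with
  | nil => simp [alt_nil]
  | cons z t' =>
    by_cases h : (z % 2 == 0) = true
    · rw [rev_sub_alt]
      have hp : (fun y : Int => (y % 2 == 0) == (z % 2 == 0)) = (fun y : Int => y % 2 == 0) := by
        funext y; rw [h]; simp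
      simp only [hp, h, if_true, List.takeWhile_cons, List.dropWhile_cons]
      simp
    · have h' : (z % 2 == 0) = false := by simpa using h
      simp [h']

-- rev_sub_alt splits off the maximal odd prefix
theorem alt_odd_split (t : List Int) :
    rev_sub_alt t =
      t.takeWhile (fun y => (y % 2 == 0) == false) ++
        rev_sub_alt (t.dropWhile (fun y => (y % 2 == 0) == false)) := by
  cases t with
  | nil => simp [alt_nil]
  | cons z t' =>
    by_cases h : (z % 2 == 0) = true
    · simp [h]
    · have h' : (z % 2 == 0) = false := by simpa using h
      rw [rev_sub_alt]
      have hp : (fun y : Int => (y % 2 == 0) == (z % 2 == 0)) =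
          (fun y : Int => (y % 2 == 0) == false) := by
        funext y; rw [h']
      simp only [hp, h', List.takeWhile_cons, List.dropWhile_cons]
      simp

theorem alt_cons_odd (x : Int) (t : List Int) (h : (x % 2 == 0) = false) :
    rev_sub_alt (x :: t) = x :: rev_sub_alt t := by
  rw [rev_sub_alt]
  have hp : (fun y : Int => (y % 2 == 0) == (x % 2 == 0)) =
      (fun y : Int => (y % 2 == 0) == false) := by
    funext y; rw [h]
  simp only [hp, h, Bool.false_eq_true, if_false, List.cons_append]
  rw [← alt_odd_split]

theorem runA_main (xs : List Int) : ∀ k : List Int,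
    runA [] k xs =
      (xs.takeWhile (fun y => y % 2 == 0)).reverse ++ k ++
        rev_sub_alt (xs.dropWhile (fun y => y % 2 == 0)) := by
  induction xs with
  | nil => intro k; simp [runA, alt_nil]
  | cons x t ih =>
    intro k
    by_cases h : (x % 2 == 0) = true
    · have h1 : runA [] k (x :: t) = runA [] (x :: k) t := by
        simp [runA, List.foldl_cons, stepA, h]
      rw [h1, ih (x :: k)]
      simp [h, List.append_assoc]
    · have h' : (x % 2 == 0) = false := by simpa using h
      have h1 : runA [] k (x :: t) = runA (k ++ [x]) [] t := by
        simp [runA, List.foldl_cons, stepA_odd _ _ _ h']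
      rw [h1, runA_prefix, ih []]
      simp only [List.append_nil]
      rw [← alt_even_split]
      simp [h', alt_cons_odd x t h', List.append_assoc]

-- ===== VERDICT (by name: the statement is the Claim_ definition above) =====
theorem rev_sub_spec : Claim_equal_rev_sub := by
  intro arr _
  show rev_sub arr = rev_sub_alt arr
  have h0 : rev_sub arr = runA [] [] arr := rfl
  rw [h0, runA_main arr []]
  simp only [List.append_nil]
  rw [← alt_even_split]
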